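-- pv_equiv track=rewrite | github.com/plturrell/cryptotrading | src/cryptotrading/infrastructure/analysis/clrs_tree_mcp_tools.py | _prioritize_recommendations
-- ===== SOURCE A (Python) =====
-- from typing import Any, Dict, List, Optional, Set, Union
--
-- def _prioritize_recommendations(recommendations: List[str]) -> List[str]:
--     """Prioritize recommendations by impact"""
--     priority_keywords = {
--         "circular": 1,  # Highest priority
--         "complexity": 2,
--         "coupling": 3,
--         "performance": 4
--     }
--
--     def get_priority(rec: str) -> int:
--         for keyword, priority in priority_keywords.items():
--             if keyword in rec.lower():
--                 return priority
--         return 5  # Default priority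
--
--     return sorted(recommendations, key=get_priority)
-- ===== SOURCE B (Python) =====
-- def _prioritize_recommendations(recommendations):
--     """Prioritize recommendations by impact (stable bucket sort, O(n))."""
--     buckets = ([], [], [], [], [])
--     for rec in recommendations:
--         low = rec.lower()
--         if "circular" in low:
--             p = 1
--         elif "complexity" in low:
--             p = 2
--         elif "coupling" in low:
--             p = 3
--         elif "performance" in low:
--             p = 4
--         else:
--             p = 5
--         buckets[p - 1].append(rec)
--     result = []
--     for b in buckets:
--         result.extend(b)
--     return result
-- ===== Notes on version B (the rewrite author's own statement) =====
-- stated objective: faster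
-- what changed: Replaces sorted(recommendations, key=get_priority) by a single-pass stable bucket distribution into five priority buckets concatenated in order.
import Mathlib
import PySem

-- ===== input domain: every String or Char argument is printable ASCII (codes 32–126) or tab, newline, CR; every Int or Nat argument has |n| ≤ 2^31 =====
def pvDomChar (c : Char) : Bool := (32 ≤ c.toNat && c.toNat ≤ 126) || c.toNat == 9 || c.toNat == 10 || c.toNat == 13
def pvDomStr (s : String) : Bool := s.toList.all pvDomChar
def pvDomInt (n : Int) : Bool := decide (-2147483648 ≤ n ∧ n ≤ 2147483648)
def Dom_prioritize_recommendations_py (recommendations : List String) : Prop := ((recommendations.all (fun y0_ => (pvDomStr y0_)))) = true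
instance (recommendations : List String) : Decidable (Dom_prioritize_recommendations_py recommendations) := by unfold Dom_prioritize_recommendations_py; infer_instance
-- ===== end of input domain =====

-- B replaces A's comparison sort (sorted with a keyword-priority key) by a stable one-pass
-- bucket distribution over the five priority levels; same return value, different algorithm.

-- ===== PORT A =====
-- the dict literal priority_keywords
def pvKeywordsA : PySem.Dict String Int :=
  PySem.Dict.ofList [("circular", 1), ("complexity", 2), ("coupling", 3), ("performance", 4)]

-- get_priority: loop over priority_keywords.items() with early return, default 5
def pvGetPriorityA : List (String × Int) → String → Int
  | [], _ => 5
  | (kw, p) :: rest, rec =>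
      if PySem.Str.isIn kw (PySem.Str.lower rec) then p else pvGetPriorityA rest rec

def prioritize_recommendations_py (recommendations : List String) : List String :=
  PySem.List.sorted recommendations (fun rec => pvGetPriorityA pvKeywordsA.items rec) false

-- ===== PORT B =====
-- priority of one recommendation: if/elif chain, default 5
def pvPriorityB (rec : String) : Int :=
  let low := PySem.Str.lower rec
  if PySem.Str.isIn "circular" low then 1
  else if PySem.Str.isIn "complexity" low then 2
  else if PySem.Str.isIn "coupling" low then 3
  else if PySem.Str.isIn "performance" low then 4
  else 5

-- buckets[p - 1].append(rec)
def pvAppendBucket (bs : List String × List String × List String × List String × List String)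
    (p : Int) (rec : String) :
    List String × List String × List String × List String × List String :=
  let (b1, b2, b3, b4, b5) := bs
  if p = 1 then (b1 ++ [rec], b2, b3, b4, b5)
  else if p = 2 then (b1, b2 ++ [rec], b3, b4, b5)
  else if p = 3 then (b1, b2, b3 ++ [rec], b4, b5)
  else if p = 4 then (b1, b2, b3, b4 ++ [rec], b5)
  else (b1, b2, b3, b4, b5 ++ [rec])

def prioritize_recommendations_py_alt (recommendations : List String) : List String :=
  let bs := recommendations.foldl (fun bs rec => pvAppendBucket bs (pvPriorityB rec) rec)
    ([], [], [], [], [])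
  bs.1 ++ bs.2.1 ++ bs.2.2.1 ++ bs.2.2.2.1 ++ bs.2.2.2.2

-- ===== PRECONDITION & SPEC =====
def Spec_prioritize_recommendations_py (recommendations : List String) (out : List String) : Prop := out = prioritize_recommendations_py_alt recommendations
instance (recommendations : List String) (out : List String) : Decidable (Spec_prioritize_recommendations_py recommendations out) := by unfold Spec_prioritize_recommendations_py; infer_instance

-- ===== CLAIM (what is proved, stated in full; the proofs are below) =====
def Claim_equal_prioritize_recommendations_py : Prop := ∀ (recommendations : List String), Dom_prioritize_recommendations_py recommendations → Spec_prioritize_recommendations_py recommendations (prioritize_recommendations_py recommendations)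

-- ===== LEMMAS AND PROOFS =====

-- the two priority helpers compute the same value
theorem pvKey_eq (rec : String) : pvGetPriorityA pvKeywordsA.items rec = pvPriorityB rec := by
  have h : pvKeywordsA.items =
      [("circular", (1 : Int)), ("complexity", 2), ("coupling", 3), ("performance", 4)] := by decide
  rw [h]
  simp only [pvGetPriorityA, pvPriorityB]

theorem pvPriorityB_range (rec : String) : 1 ≤ pvPriorityB rec ∧ pvPriorityB rec ≤ 5 := by
  simp only [pvPriorityB]
  split_ifs <;> omega

-- n consecutive key-filter buckets starting at level lo
def pvBuckets {α : Type} (K : α → Int) (lo : Int) : Nat → List α → List α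
  | 0, _ => []
  | n + 1, ys => ys.filter (fun r => decide (K r = lo)) ++ pvBuckets K (lo + 1) n ys

theorem mem_pvBuckets {α : Type} (K : α → Int) (lo : Int) (n : Nat) (ys : List α) :
    ∀ a ∈ pvBuckets K lo n ys, lo ≤ K a := by
  induction n generalizing lo with
  | zero => simp [pvBuckets]
  | succ n ih =>
      intro a ha
      simp only [pvBuckets, List.mem_append, List.mem_filter, decide_eq_true_eq] at ha
      rcases ha with ⟨_, h⟩ | h
      · omega
      · have := ih (lo + 1) a h
        omega

theorem pvBuckets_append_lt {α : Type} (K : α → Int) (lo : Int) (n : Nat) (ys : List α) (x : α)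
    (hx : K x < lo) : pvBuckets K lo n (ys ++ [x]) = pvBuckets K lo n ys := by
  induction n generalizing lo with
  | zero => simp [pvBuckets]
  | succ n ih =>
      have hne : ¬ (K x = lo) := by omega
      simp [pvBuckets, List.filter_append, hne,
        ih (lo + 1) (by omega)]

-- insertBy skips a block x goes after
theorem insertBy_skip {α : Type} (bf : α → α → Bool) (x : α) (l t : List α)
    (hl : ∀ a ∈ l, bf x a = false) :
    PySem.List.insertBy bf x (l ++ t) = l ++ PySem.List.insertBy bf x t := by
  induction l with
  | nil => simp
  | cons y ys ih =>
      have hy : bf x y = false := hl y (by simp)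
      simp [PySem.List.insertBy, hy, ih (fun a ha => hl a (by simp [ha]))]

-- insertBy puts x in front of a block it goes before
theorem insertBy_front {α : Type} (bf : α → α → Bool) (x : α) (t : List α)
    (ht : ∀ a ∈ t, bf x a = true) :
    PySem.List.insertBy bf x t = x :: t := by
  cases t with
  | nil => simp [PySem.List.insertBy]
  | cons y ys => simp [PySem.List.insertBy, ht y (by simp)]

-- one stable insertion lands in its own bucket
theorem insertBy_pvBuckets {α : Type} (K : α → Int) (lo : Int) (n : Nat) (ys : List α) (x : α)
    (h1 : lo ≤ K x) (h2 : K x < lo + n) :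
    PySem.List.insertBy (fun a b => decide (K a < K b)) x (pvBuckets K lo n ys) =
      pvBuckets K lo n (ys ++ [x]) := by
  induction n generalizing lo with
  | zero => omega
  | succ n ih =>
      by_cases hx : K x = lo
      · -- x goes at the end of the first bucket, before all deeper buckets
        rw [pvBuckets, insertBy_skip _ x _ _ (by
            intro a ha
            simp only [List.mem_filter, decide_eq_true_eq] at ha
            simp only [decide_eq_false_iff_not, not_lt]
            omega),
          insertBy_front _ x _ (by
            intro a ha
            have := mem_pvBuckets K (lo + 1) n ys a ha
            simp only [decide_eq_true_eq]
            omega)]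
        have hrest : pvBuckets K (lo + 1) n (ys ++ [x]) = pvBuckets K (lo + 1) n ys :=
          pvBuckets_append_lt K (lo + 1) n ys x (by omega)
        simp [pvBuckets, List.filter_append, hx, hrest]
      · -- x skips the first bucket entirely
        rw [pvBuckets, insertBy_skip _ x _ _ (by
            intro a ha
            simp only [List.mem_filter, decide_eq_true_eq] at ha
            simp only [decide_eq_false_iff_not, not_lt]
            omega),
          ih (lo + 1) (by omega) (by omega)]
        simp [pvBuckets, List.filter_append, hx]

-- stable sort by a key with values in {1,…,5} is the concatenation of the five key-filters
theorem sorted_eq_pvBuckets {α : Type} (K : α → Int) (hK : ∀ r, 1 ≤ K r ∧ K r ≤ 5) (xs : List α) :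
    PySem.List.sorted xs K false = pvBuckets K 1 5 xs := by
  rw [PySem.List.sorted_eq_foldl_insertBy]
  induction xs using List.reverseRecOn with
  | nil => simp [pvBuckets]
  | append_singleton ys x ih =>
      rw [List.foldl_append, List.foldl_cons, List.foldl_nil, ih,
        insertBy_pvBuckets K 1 5 ys x (hK x).1 (by have := (hK x).2; omega)]

-- B's fold fills each bucket with the corresponding key-filter, in input order
theorem buckets_foldl (xs : List String) (b1 b2 b3 b4 b5 : List String) :
    xs.foldl (fun bs rec => pvAppendBucket bs (pvPriorityB rec) rec) (b1, b2, b3, b4, b5) =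
      (b1 ++ xs.filter (fun r => decide (pvPriorityB r = 1)),
       b2 ++ xs.filter (fun r => decide (pvPriorityB r = 2)),
       b3 ++ xs.filter (fun r => decide (pvPriorityB r = 3)),
       b4 ++ xs.filter (fun r => decide (pvPriorityB r = 4)),
       b5 ++ xs.filter (fun r => decide (pvPriorityB r = 5))) := by
  induction xs generalizing b1 b2 b3 b4 b5 with
  | nil => simp
  | cons x t ih =>
      have hx := pvPriorityB_range x
      have hp : pvPriorityB x = 1 ∨ pvPriorityB x = 2 ∨ pvPriorityB x = 3 ∨
          pvPriorityB x = 4 ∨ pvPriorityB x = 5 := by omega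
      rcases hp with hp | hp | hp | hp | hp
      · have hstep : pvAppendBucket (b1, b2, b3, b4, b5) (pvPriorityB x) x = (b1 ++ [x], b2, b3, b4, b5) := by
          simp [pvAppendBucket, hp]
        rw [List.foldl_cons, hstep, ih]
        simp [hp]
      · have hstep : pvAppendBucket (b1, b2, b3, b4, b5) (pvPriorityB x) x = (b1, b2 ++ [x], b3, b4, b5) := by
          simp [pvAppendBucket, hp]
        rw [List.foldl_cons, hstep, ih]
        simp [hp]
      · have hstep : pvAppendBucket (b1, b2, b3, b4, b5) (pvPriorityB x) x = (b1, b2, b3 ++ [x], b4, b5) := by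
          simp [pvAppendBucket, hp]
        rw [List.foldl_cons, hstep, ih]
        simp [hp]
      · have hstep : pvAppendBucket (b1, b2, b3, b4, b5) (pvPriorityB x) x = (b1, b2, b3, b4 ++ [x], b5) := by
          simp [pvAppendBucket, hp]
        rw [List.foldl_cons, hstep, ih]
        simp [hp]
      · have hstep : pvAppendBucket (b1, b2, b3, b4, b5) (pvPriorityB x) x = (b1, b2, b3, b4, b5 ++ [x]) := by
          simp [pvAppendBucket, hp]
        rw [List.foldl_cons, hstep, ih]
        simp [hp]

-- ===== VERDICT (by name: the statement is the Claim_ definition above) =====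
theorem prioritize_recommendations_py_spec : Claim_equal_prioritize_recommendations_py := by
  intro recs _
  show _ = _
  unfold prioritize_recommendations_py prioritize_recommendations_py_alt
  have hkey : (fun rec => pvGetPriorityA pvKeywordsA.items rec) = pvPriorityB := by
    funext rec; exact pvKey_eq rec
  rw [hkey, buckets_foldl, sorted_eq_pvBuckets pvPriorityB pvPriorityB_range]
  norm_num [pvBuckets]
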